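-- pv_equiv track=rewrite | github.com/Flissel/la_fungus_search | src/embeddinggemma/realtime/server.py | _is_import_only
-- ===== SOURCE A (Python) =====
-- def _is_import_only(content: str) -> bool:
--     if not content:
--         return False
--     lines = [ln.strip() for ln in content.splitlines() if ln.strip()]
--     if not lines:
--         return False
--     non_comments = [ln for ln in lines if not ln.startswith('#')]
--     if not non_comments:
--         return True
--     code_like = [ln for ln in non_comments if not (ln.startswith('import ') or ln.startswith('from ') or ln.startswith('"""') or ln.startswith("'''"))]
--     return len(code_like) == 0
-- ===== SOURCE B (Python) =====
-- _ALLOWED = ('import ', 'from ', '"""', "'''")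
--
-- def _is_import_only(content: str) -> bool:
--     code = comment = allowed = 0
--     for ln in content.splitlines():
--         s = ln.strip()
--         if not s:
--             continue
--         elif s.startswith('#'):
--             comment += 1
--         elif s.startswith(_ALLOWED):
--             allowed += 1
--         else:
--             code += 1
--     return code == 0 and comment + allowed > 0
-- ===== Notes on version B (the rewrite author's own statement) =====
-- stated objective: alternative
-- what changed: Replaced A's staged list comprehensions and emptiness tests by a single classify-and-count pass that tallies comment/allowed/code lines into three counters and decides by arithmetic on the counts, which also makes the separate empty-content guard unnecessary.
import Mathlib
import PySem

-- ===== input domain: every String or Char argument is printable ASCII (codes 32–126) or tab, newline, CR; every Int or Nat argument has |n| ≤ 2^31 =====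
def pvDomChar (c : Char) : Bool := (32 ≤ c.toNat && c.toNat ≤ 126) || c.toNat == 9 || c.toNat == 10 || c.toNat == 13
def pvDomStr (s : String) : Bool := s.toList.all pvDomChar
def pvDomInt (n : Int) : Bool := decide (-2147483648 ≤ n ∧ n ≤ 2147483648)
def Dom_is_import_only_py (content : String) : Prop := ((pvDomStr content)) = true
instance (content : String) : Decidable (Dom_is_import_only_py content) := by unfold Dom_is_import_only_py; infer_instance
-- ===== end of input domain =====

-- B replaces A's staged list filters and emptiness tests with one classify-and-count pass deciding by arithmetic on three counters (alternative decomposition; no speed claim).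

-- ===== PORT A =====
def pvCodeLikePred (ln : String) : Bool :=
  !(PySem.Str.startswith ln "import " || PySem.Str.startswith ln "from " ||
    PySem.Str.startswith ln "\"\"\"" || PySem.Str.startswith ln "'''")

def is_import_only_py (content : String) : Bool :=
  if content == "" then false
  else
    let lines := ((PySem.Str.splitlines content).filter
        (fun ln => PySem.Str.strip ln != "")).map PySem.Str.strip
    if lines.isEmpty then false
    else
      let non_comments := lines.filter (fun ln => !(PySem.Str.startswith ln "#"))
      if non_comments.isEmpty then true
      else
        let code_like := non_comments.filter pvCodeLikePred
        code_like.length == 0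

-- ===== PORT B =====
def pvTally : List String → Int × Int × Int → Int × Int × Int
  | [], st => st
  | ln :: rest, (code, comment, allowed) =>
    let s := PySem.Str.strip ln
    if s == "" then pvTally rest (code, comment, allowed)
    else if PySem.Str.startswith s "#" then pvTally rest (code, comment + 1, allowed)
    else if PySem.Str.startswith s "import " || PySem.Str.startswith s "from " ||
            PySem.Str.startswith s "\"\"\"" || PySem.Str.startswith s "'''" then
      pvTally rest (code, comment, allowed + 1)
    else pvTally rest (code + 1, comment, allowed)

def is_import_only_py_alt (content : String) : Bool :=
  let st := pvTally (PySem.Str.splitlines content) (0, 0, 0)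
  (st.1 == 0) && decide (0 < st.2.1 + st.2.2)

-- ===== PRECONDITION & SPEC =====
def Spec_is_import_only_py (content : String) (out : Bool) : Prop := out = is_import_only_py_alt content
instance (content : String) (out : Bool) : Decidable (Spec_is_import_only_py content out) := by unfold Spec_is_import_only_py; infer_instance

-- ===== CLAIM (what is proved, stated in full; the proofs are below) =====
def Claim_equal_is_import_only_py : Prop := ∀ (content : String), Dom_is_import_only_py content → Spec_is_import_only_py content (is_import_only_py content)

-- ===== LEMMAS AND PROOFS =====

/-- A's stripped non-blank lines, as a named function of the raw line list. -/
def pvLines (L : List String) : List String :=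
  (L.filter (fun ln => PySem.Str.strip ln != "")).map PySem.Str.strip

def pvNC (L : List String) : List String :=
  (pvLines L).filter (fun ln => !(PySem.Str.startswith ln "#"))

def pvCmt (L : List String) : List String :=
  (pvLines L).filter (fun ln => PySem.Str.startswith ln "#")

def pvCode (L : List String) : List String :=
  (pvNC L).filter pvCodeLikePred

def pvAllow (L : List String) : List String :=
  (pvNC L).filter (fun ln => !pvCodeLikePred ln)

/-- A's result, phrased with the named helper lists (definitional). -/
theorem pvA_char (content : String) :
    is_import_only_py content =
      (if content == "" then false
       else if (pvLines (PySem.Str.splitlines content)).isEmpty then false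
       else if (pvNC (PySem.Str.splitlines content)).isEmpty then true
       else ((pvCode (PySem.Str.splitlines content)).length == 0)) := rfl

theorem pvFilter_partition {α : Type} (p : α → Bool) (l : List α) :
    (l.filter p).length + (l.filter (fun x => !p x)).length = l.length := by
  induction l with
  | nil => simp
  | cons x xs ih =>
    by_cases h : p x = true
    · simp only [List.filter_cons, h, Bool.not_true, if_true]
      simp; omega
    · have hf : p x = false := Bool.eq_false_iff.mpr h
      simp only [List.filter_cons, hf, Bool.not_false]
      simp; omega

theorem pvTally_eq (L : List String) (c m a : Int) :
    pvTally L (c, m, a) =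
      (c + (pvCode L).length, m + (pvCmt L).length, a + (pvAllow L).length) := by
  induction L generalizing c m a with
  | nil => simp [pvTally, pvLines, pvNC, pvCmt, pvCode, pvAllow]
  | cons ln rest ih =>
    by_cases h0 : (PySem.Str.strip ln == "") = true
    · have h0' : PySem.Str.strip ln = "" := eq_of_beq h0
      have hl : pvLines (ln :: rest) = pvLines rest := by
        simp only [pvLines, List.filter_cons, bne, h0, Bool.not_true]
        simp
      simp only [pvTally, h0, if_true]
      simp only [pvCode, pvCmt, pvAllow, pvNC, hl]
      exact ih c m a
    · have h0f : (PySem.Str.strip ln == "") = false := Bool.eq_false_iff.mpr h0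
      have hl : pvLines (ln :: rest) = PySem.Str.strip ln :: pvLines rest := by
        simp only [pvLines, List.filter_cons, bne, h0f, Bool.not_false, if_true, List.map_cons]
      by_cases h1 : PySem.Str.startswith (PySem.Str.strip ln) "#" = true
      · have hnc : pvNC (ln :: rest) = pvNC rest := by
          simp only [pvNC, hl, List.filter_cons, h1, Bool.not_true]
          simp
        have hcmt : pvCmt (ln :: rest) = PySem.Str.strip ln :: pvCmt rest := by
          simp only [pvCmt, hl, List.filter_cons, h1, if_true]
        have hcode : pvCode (ln :: rest) = pvCode rest := by simp only [pvCode, hnc]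
        have hallow : pvAllow (ln :: rest) = pvAllow rest := by simp only [pvAllow, hnc]
        simp only [pvTally, h0f, Bool.false_eq_true, if_false, h1, if_true]
        simp only [hcode, hallow, hcmt]
        rw [ih]
        simp [Prod.ext_iff, List.length_cons]
        all_goals omega
      · have h1f : PySem.Str.startswith (PySem.Str.strip ln) "#" = false :=
          Bool.eq_false_iff.mpr h1
        have hnc : pvNC (ln :: rest) = PySem.Str.strip ln :: pvNC rest := by
          simp only [pvNC, hl, List.filter_cons, h1f, Bool.not_false, if_true]
        have hcmt : pvCmt (ln :: rest) = pvCmt rest := by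
          simp only [pvCmt, hl, List.filter_cons, h1f]
          simp
        cases h2' : (PySem.Str.startswith (PySem.Str.strip ln) "import " ||
              PySem.Str.startswith (PySem.Str.strip ln) "from " ||
              PySem.Str.startswith (PySem.Str.strip ln) "\"\"\"" ||
              PySem.Str.startswith (PySem.Str.strip ln) "'''") with
        | false =>
          -- code-like line
          have h2 : pvCodeLikePred (PySem.Str.strip ln) = true := by
            simp only [pvCodeLikePred, h2', Bool.not_false]
          have hcode : pvCode (ln :: rest) = PySem.Str.strip ln :: pvCode rest := by
            simp only [pvCode, hnc, List.filter_cons, h2, if_true]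
          have hallow : pvAllow (ln :: rest) = pvAllow rest := by
            simp only [pvAllow, hnc, List.filter_cons, h2, Bool.not_true]
            simp
          simp only [pvTally, h0f, Bool.false_eq_true, if_false, h1f, h2', if_false]
          simp only [hcode, hallow, hcmt]
          rw [ih]
          simp [Prod.ext_iff, List.length_cons]
          all_goals omega
        | true =>
          have h2f : pvCodeLikePred (PySem.Str.strip ln) = false := by
            simp only [pvCodeLikePred, h2', Bool.not_true]
          have hcode : pvCode (ln :: rest) = pvCode rest := by
            simp only [pvCode, hnc, List.filter_cons, h2f]
            simp
          have hallow : pvAllow (ln :: rest) = PySem.Str.strip ln :: pvAllow rest := by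
            simp only [pvAllow, hnc, List.filter_cons, h2f, Bool.not_false, if_true]
          simp only [pvTally, h0f, Bool.false_eq_true, if_false, h1f, h2', if_true]
          simp only [hcode, hallow, hcmt]
          rw [ih]
          simp [Prod.ext_iff, List.length_cons]
          all_goals omega

theorem pvLines_partition (L : List String) :
    (pvLines L).length = (pvCmt L).length + (pvNC L).length :=
  (pvFilter_partition (fun ln => PySem.Str.startswith ln "#") (pvLines L)).symm

theorem pvNC_partition (L : List String) :
    (pvNC L).length = (pvCode L).length + (pvAllow L).length :=
  (pvFilter_partition pvCodeLikePred (pvNC L)).symm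

-- ===== VERDICT (by name: the statement is the Claim_ definition above) =====
theorem is_import_only_py_spec : Claim_equal_is_import_only_py := by
  intro content _
  unfold Spec_is_import_only_py is_import_only_py_alt
  rw [pvA_char, pvTally_eq]
  set L := PySem.Str.splitlines content with hLdef
  have hpart1 := pvLines_partition L
  have hpart2 := pvNC_partition L
  by_cases hc : content == ""
  · have hc' : content = "" := eq_of_beq hc
    have hL : L = [] := by rw [hLdef, hc']; decide
    simp [hc, hL, pvCode, pvCmt, pvAllow, pvNC, pvLines]
  · simp only [hc, Bool.false_eq_true, if_false]
    by_cases hE : (pvLines L).isEmpty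
    · have hL0 : pvLines L = [] := List.isEmpty_iff.mp hE
      have hN0 : pvNC L = [] := by simp [pvNC, hL0]
      have hcd : pvCode L = [] := by simp [pvCode, hN0]
      have hal : pvAllow L = [] := by simp [pvAllow, hN0]
      have hcm : pvCmt L = [] := by simp [pvCmt, hL0]
      simp [hE, hcd, hal, hcm]
    · have hLpos : 0 < (pvLines L).length := by
        cases hlc : pvLines L with
        | nil => rw [hlc] at hE; simp at hE
        | cons x xs => simp
      simp only [hE, Bool.false_eq_true, if_false]
      by_cases hN : (pvNC L).isEmpty
      · have hN0 : pvNC L = [] := List.isEmpty_iff.mp hN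
        have hcd : pvCode L = [] := by simp [pvCode, hN0]
        have hal : pvAllow L = [] := by simp [pvAllow, hN0]
        have hcm : 0 < (pvCmt L).length := by
          rw [hN0] at hpart1; simpa [hpart1] using hLpos
        simp only [hN, if_true, hcd, hal]
        simp
        omega
      · have hNpos : 0 < (pvNC L).length := by
          cases hlc : pvNC L with
          | nil => rw [hlc] at hN; simp at hN
          | cons x xs => simp
        simp only [hN, Bool.false_eq_true, if_false]
        rcases Nat.eq_zero_or_pos (pvCode L).length with hz | hz
        · have hal : 0 < (pvAllow L).length := by omega
          simp [hz]
          omega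
        · have ha : (((pvCode L).length) == 0) = false := by
            simp only [beq_eq_false_iff_ne, ne_eq]
            omega
          simp [ha]
          intro h
          rw [h] at hz
          simp at hz
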